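-- pv_equiv track=rewrite | github.com/kimkihoon0515/CodingTest | 프로그래머스/level2/12973.py | solution
-- ===== SOURCE A (Python) =====
-- def solution(s):
--     answer = -1
--     stack = [s[0]] # 문자열 맨 처음 글자 넣고
--
--     for i in range(1,len(s)): # 반복문돌려서
--         if stack and stack[-1] == s[i]: # stack에 글자가 있고 마지막 글자가 같으면
--             stack.pop() # 없애고
--         else: # 아니면 넣는다.
--             stack.append(s[i])
--     if not stack: # stack이 비어있으면 1 아니면 0을 출력
--         answer = 1
--     else:
--         answer = 0
--     return answer
-- ===== SOURCE B (Python) =====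
-- def solution(s):
--     # Repeated removal: find the first adjacent equal pair, delete it, restart.
--     t = s
--     while True:
--         for i in range(len(t) - 1):
--             if t[i] == t[i + 1]:
--                 t = t[:i] + t[i + 2:]
--                 break
--         else:
--             return 1 if not t else 0
-- ===== Notes on version B (the rewrite author's own statement) =====
-- stated objective: alternative
-- what changed: Replaces the one-pass stack with the naive rewriting strategy: repeatedly scan for the first adjacent equal pair, delete it and restart until no pair remains.
-- outside the precondition, e.g. on solution(''): A raises IndexError, B returns 1
-- crash fix: A raises IndexError on the empty string (unconditional s[0] access); B returns 1 there, the natural value for a fully-reduced string. — e.g. on solution(""): A raises IndexError, B returns 1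
import Mathlib
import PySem

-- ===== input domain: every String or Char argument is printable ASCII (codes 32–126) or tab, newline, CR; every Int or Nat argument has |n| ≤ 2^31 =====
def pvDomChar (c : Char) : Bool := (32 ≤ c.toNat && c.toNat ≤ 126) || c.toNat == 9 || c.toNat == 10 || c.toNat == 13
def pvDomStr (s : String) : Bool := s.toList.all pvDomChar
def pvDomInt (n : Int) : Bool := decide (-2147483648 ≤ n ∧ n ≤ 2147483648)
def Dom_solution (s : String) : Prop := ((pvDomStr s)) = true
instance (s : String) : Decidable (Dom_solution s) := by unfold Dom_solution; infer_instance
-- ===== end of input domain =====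

-- B replaces A's one-pass stack by naive repeated first-pair removal (alternative algorithm, not faster);
-- A raises IndexError on "" (excluded by Pre_), where B returns 1.

-- ===== PORT A =====
-- one loop step of A: pop if the top equals the char, else push
def pvStep (st : List Char) (c : Char) : List Char :=
  match st with
  | [] => [c]
  | t :: ts => if t = c then ts else c :: t :: ts

def solution (s : String) : Int :=
  match s.toList with
  | [] => 0            -- Python: s[0] raises IndexError here; excluded by Pre_solution
  | c :: rest =>
    let stack := rest.foldl pvStep [c]   -- stack = [s[0]]; for i in range(1, len(s)): …
    if stack = [] then 1 else 0

-- ===== PORT B =====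
-- index of the first i with t[i] = t[i+1], if any (B's inner for-loop)
def pvFindPair : List Char → Option Nat
  | a :: b :: rest => if a = b then some 0 else (pvFindPair (b :: rest)).map (· + 1)
  | _ => none

theorem pvFindPair_le {l : List Char} {i : Nat} (h : pvFindPair l = some i) :
    i + 2 ≤ l.length := by
  induction l generalizing i with
  | nil => simp [pvFindPair] at h
  | cons a l ih =>
    cases l with
    | nil => simp [pvFindPair] at h
    | cons b r =>
      simp only [pvFindPair] at h
      split at h
      · cases h; simp
      · rcases Option.map_eq_some_iff.mp h with ⟨j, hj, rfl⟩
        have := ih hj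
        simpa using Nat.succ_le_succ this

-- B's outer while-loop: remove the first pair and restart, until none remains
def pvReduce (l : List Char) : Int :=
  match h : pvFindPair l with
  | some i => pvReduce (l.take i ++ l.drop (i + 2))
  | none => if l = [] then 1 else 0
termination_by l.length
decreasing_by
  have hb := pvFindPair_le h
  simp only [List.length_append, List.length_take, List.length_drop]
  omega

def solution_alt (s : String) : Int := pvReduce s.toList

-- ===== PRECONDITION & SPEC =====
-- Pre_ excludes only the empty string, on which A's unconditional s[0] raises IndexError.
def Pre_solution (s : String) : Prop := s ≠ ""
instance (s : String) : Decidable (Pre_solution s) := by unfold Pre_solution; infer_instance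
def pvWitness_solution : String := "baabaa"

-- A raises IndexError exactly on the empty string; B returns 1 there.
def Raises_solution (s : String) : Prop := s = ""
instance (s : String) : Decidable (Raises_solution s) := by unfold Raises_solution; infer_instance
def pvRaiseWitness_solution : String := ""
def pvRaiseWitnessOut_solution : Int := 1

def Spec_solution (s : String) (out : Int) : Prop := out = solution_alt s
instance (s : String) (out : Int) : Decidable (Spec_solution s out) := by unfold Spec_solution; infer_instance

-- ===== CLAIM (what is proved, stated in full; the proofs are below) =====
def Claim_equal_solution : Prop := ∀ (s : String), Dom_solution s → Pre_solution s → Spec_solution s (solution s)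
def Claim_raises_solution : Prop := (∀ (s : String), Dom_solution s → Raises_solution s → ¬ Pre_solution s) ∧ (Dom_solution (pvRaiseWitness_solution) ∧ Raises_solution (pvRaiseWitness_solution) ∧ solution_alt (pvRaiseWitness_solution) = pvRaiseWitnessOut_solution)

-- ===== LEMMAS AND PROOFS =====

-- "no two adjacent equal characters"
def pvNoAdj : List Char → Prop
  | a :: b :: r => a ≠ b ∧ pvNoAdj (b :: r)
  | _ => True

-- pvStep preserves "no two adjacent equal elements" of the stack
theorem pvStep_noAdj {st : List Char} (c : Char) (h : pvNoAdj st) :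
    pvNoAdj (pvStep st c) := by
  cases st with
  | nil => simp [pvStep, pvNoAdj]
  | cons t ts =>
    simp only [pvStep]
    split
    · cases ts with
      | nil => trivial
      | cons u us => exact h.2
    · rename_i htc
      exact ⟨fun hh => htc hh.symm, h⟩

-- pushing then processing the same char twice is the identity, on a no-adjacent stack
theorem pvStep_step {st : List Char} (a : Char) (h : pvNoAdj st) :
    pvStep (pvStep st a) a = st := by
  cases st with
  | nil => simp [pvStep]
  | cons t ts =>
    by_cases hta : t = a
    · subst hta
      cases ts with
      | nil => simp [pvStep]
      | cons u us =>
        have hne : t ≠ u := h.1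
        simp [pvStep, Ne.symm hne]
    · simp [pvStep, hta]

-- removing the first adjacent pair does not change the final stack
theorem foldl_removePair {l : List Char} {i : Nat} (h : pvFindPair l = some i)
    (st : List Char) (hst : pvNoAdj st) :
    l.foldl pvStep st = (l.take i ++ l.drop (i + 2)).foldl pvStep st := by
  induction l generalizing i st with
  | nil => simp [pvFindPair] at h
  | cons a l ih =>
    cases l with
    | nil => simp [pvFindPair] at h
    | cons b r =>
      simp only [pvFindPair] at h
      split at h
      · rename_i hab
        cases h
        subst hab
        simp only [List.take_zero, List.nil_append, List.drop_succ_cons, List.drop_zero,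
          List.foldl_cons]
        rw [pvStep_step a hst]
      · rcases Option.map_eq_some_iff.mp h with ⟨j, hj, rfl⟩
        simp only [List.foldl_cons, List.take_succ_cons, List.drop_succ_cons, List.cons_append]
        exact ih hj (pvStep st a) (pvStep_noAdj a hst)

-- with no adjacent pair and a top differing from the head, the fold reverses l onto st
theorem foldl_no_pair {l : List Char} (h : pvFindPair l = none)
    (st : List Char) (hhd : ∀ a, l.head? = some a → st.head? ≠ some a) :
    l.foldl pvStep st = l.reverse ++ st := by
  induction l generalizing st with
  | nil => simp
  | cons a l ih =>
    have hstep : pvStep st a = a :: st := by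
      cases st with
      | nil => simp [pvStep]
      | cons t ts =>
        have : t ≠ a := by
          intro hh; exact hhd a rfl (by simp [hh])
        simp [pvStep, this]
    have hl : pvFindPair l = none ∧ ∀ b, l.head? = some b → a ≠ b := by
      cases l with
      | nil => exact ⟨rfl, by simp⟩
      | cons b r =>
        simp only [pvFindPair] at h
        split at h
        · exact absurd h (by simp)
        · rename_i hab
          refine ⟨?_, ?_⟩
          · cases hmap : pvFindPair (b :: r) with
            | none => rfl
            | some j => rw [hmap] at h; simp at h
          · intro c hc; simp only [List.head?_cons, Option.some.injEq] at hc
            subst hc; exact hab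
    simp only [List.foldl_cons]
    rw [hstep, ih hl.1 (a :: st)
      (by intro b hb; simp only [List.head?_cons, ne_eq, Option.some.injEq]
          intro hba; exact hl.2 b hb hba)]
    simp

theorem pvReduce_eq (l : List Char) :
    pvReduce l = if l.foldl pvStep [] = [] then 1 else 0 := by
  induction l using pvReduce.induct with
  | case1 l i h ih =>
    rw [pvReduce]
    split
    · rename_i j hj
      rw [h] at hj
      cases hj
      rw [ih, foldl_removePair h [] trivial]
    · rename_i hnone
      rw [h] at hnone
      cases hnone
  | case2 h =>
    rw [pvReduce]
    split
    · rename_i j hj; rw [h] at hj; cases hj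
    · rfl
  | case3 l h hne =>
    rw [pvReduce]
    split
    · rename_i j hj
      rw [h] at hj
      cases hj
    · rw [foldl_no_pair h [] (by simp)]
      simp only [List.append_nil]
      have : l.reverse ≠ [] := by simpa using hne
      simp [hne, this]

-- ===== VERDICT (by name: the statement is the Claim_ definition above) =====
theorem solution_spec : Claim_equal_solution := by
  intro s _ hpre
  unfold Spec_solution solution solution_alt
  have hne : s.toList ≠ [] := by
    intro hh
    exact hpre (by cases s with | _ d => simp at hh; simp [hh])
  cases hl : s.toList with
  | nil => exact absurd hl hne
  | cons c rest =>
    rw [pvReduce_eq]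
    simp only [List.foldl_cons]
    rfl

def solution_raises : Claim_raises_solution := by
  unfold Claim_raises_solution
  refine ⟨fun s _ hr hp => hp hr, by decide, rfl, ?_⟩
  show pvReduce "".toList = _
  rw [pvReduce_eq]
  rfl
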